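-- pv_equiv track=rewrite | github.com/ishandutta2007/codeforces | box/normal/593/C.py | canonise
-- ===== SOURCE A (Python) =====
-- def canonise(t):
-- 	if t < 0:
-- 		return "(0-" + canonise(-t) + ")"
-- 	ans = ""
-- 	while t > 50:
-- 		ans += "(50+"
-- 		t -= 50
-- 	return ans + str(t) + ")" * (len(ans)//4)
-- ===== SOURCE B (Python) =====
-- def canonise(t):
--     if t < 0:
--         return "(0-" + canonise(-t) + ")"
--     n = max(0, (t - 1) // 50)
--     rem = t - 50 * n
--     return "(50+" * n + str(rem) + ")" * n
-- ===== Notes on version B (the rewrite author's own statement) =====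
-- stated objective: faster
-- what changed: Replaced the subtract-a-chunk while loop that accumulates the opening pieces incrementally with a closed-form chunk count max(0,(t-1)//chunk) and string repetition.
import Mathlib
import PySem

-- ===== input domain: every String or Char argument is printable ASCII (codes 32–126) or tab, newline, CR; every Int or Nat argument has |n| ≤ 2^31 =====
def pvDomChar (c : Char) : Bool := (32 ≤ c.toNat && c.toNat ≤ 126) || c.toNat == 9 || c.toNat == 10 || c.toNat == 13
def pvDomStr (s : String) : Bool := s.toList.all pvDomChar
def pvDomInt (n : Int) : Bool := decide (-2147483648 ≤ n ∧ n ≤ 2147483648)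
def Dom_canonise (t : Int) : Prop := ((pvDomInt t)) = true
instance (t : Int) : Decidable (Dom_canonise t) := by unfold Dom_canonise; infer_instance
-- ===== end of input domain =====

-- B replaces A's subtract-a-chunk accumulation loop by a closed-form repetition count; objective: faster.

-- ===== PORT A =====
-- the while loop of A, transcribed step for step
def canoniseLoopA (t : Int) (ans : List Char) : List Char :=
  if 50 < t then canoniseLoopA (t - 50) (ans ++ ['(', '5', '0', '+'])
  else ans ++ PySem.Int.toChars t ++
    List.replicate ((PySem.Int.floordiv (ans.length : Int) 4).toNat) ')'
termination_by t.toNat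
decreasing_by omega

def canoniseL (t : Int) : List Char :=
  if t < 0 then ['(', '0', '-'] ++ canoniseL (-t) ++ [')']
  else canoniseLoopA t []
termination_by (if t < 0 then 1 else 0)
decreasing_by split_ifs <;> omega

def canonise (t : Int) : String := String.ofList (canoniseL t)

-- ===== PORT B =====
def canoniseAltL (t : Int) : List Char :=
  if t < 0 then ['(', '0', '-'] ++ canoniseAltL (-t) ++ [')']
  else
    let n : Int := max 0 (PySem.Int.floordiv (t - 1) 50)
    let rem : Int := t - 50 * n
    (List.replicate n.toNat ['(', '5', '0', '+']).flatten ++ PySem.Int.toChars rem ++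
      List.replicate n.toNat ')'
termination_by (if t < 0 then 1 else 0)
decreasing_by split_ifs <;> omega

def canonise_alt (t : Int) : String := String.ofList (canoniseAltL t)

-- ===== PRECONDITION & SPEC =====
def Spec_canonise (t : Int) (out : String) : Prop := out = canonise_alt t
instance (t : Int) (out : String) : Decidable (Spec_canonise t out) := by unfold Spec_canonise; infer_instance

-- ===== CLAIM (what is proved, stated in full; the proofs are below) =====
def Claim_equal_canonise : Prop := ∀ (t : Int), Dom_canonise t → Spec_canonise t (canonise t)

-- ===== LEMMAS AND PROOFS =====
def pvNI (t : Int) : Int := max 0 (PySem.Int.floordiv (t - 1) 50)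

def pvRep4 (k : Nat) : List Char := (List.replicate k ['(', '5', '0', '+']).flatten

theorem pvRep4_succ (k : Nat) : pvRep4 k ++ ['(', '5', '0', '+'] = pvRep4 (k + 1) := by
  simp [pvRep4, List.replicate_succ']

theorem pvRep4_len (k : Nat) : (pvRep4 k).length = 4 * k := by
  induction k with
  | zero => simp [pvRep4]
  | succ n ih => rw [← pvRep4_succ]; simp [ih]; omega

theorem pvNI_step (t : Int) (h : 50 < t) : pvNI t = pvNI (t - 50) + 1 := by
  unfold pvNI
  rw [PySem.Int.floordiv_eq_ediv_of_pos (by norm_num), PySem.Int.floordiv_eq_ediv_of_pos (by norm_num)]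
  omega

theorem pvNI_base (t : Int) (h : ¬ 50 < t) : pvNI t = 0 := by
  unfold pvNI
  rw [PySem.Int.floordiv_eq_ediv_of_pos (by norm_num)]
  omega

theorem loopA_eq (t : Int) (k : Nat) :
    canoniseLoopA t (pvRep4 k) =
      pvRep4 (k + (pvNI t).toNat) ++ PySem.Int.toChars (t - 50 * pvNI t) ++
        List.replicate (k + (pvNI t).toNat) ')' := by
  by_cases h : 50 < t
  · rw [canoniseLoopA, if_pos h, pvRep4_succ, loopA_eq (t - 50) (k + 1)]
    have h1 := pvNI_step t h
    have h2 : 0 ≤ pvNI (t - 50) := le_max_left _ _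
    have hk : k + 1 + (pvNI (t - 50)).toNat = k + (pvNI t).toNat := by omega
    rw [hk]
    have harg : t - 50 - 50 * pvNI (t - 50) = t - 50 * pvNI t := by rw [h1]; ring
    rw [harg]
  · rw [canoniseLoopA, if_neg h, pvNI_base t h]
    have hlen : ((pvRep4 k).length : Int) = 4 * k := by rw [pvRep4_len]; push_cast; ring
    rw [hlen, PySem.Int.floordiv_eq_ediv_of_pos (by norm_num)]
    have : ((4 * (k : Int)) / 4).toNat = k + 0 := by omega
    rw [this]
    simp
termination_by t.toNat
decreasing_by omega

theorem L_eq_nonneg (t : Int) (h : ¬ t < 0) : canoniseL t = canoniseAltL t := by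
  rw [canoniseL, if_neg h, canoniseAltL, if_neg h]
  have h0 : canoniseLoopA t [] = canoniseLoopA t (pvRep4 0) := by simp [pvRep4]
  rw [h0, loopA_eq t 0]
  simp only [pvRep4, pvNI, Nat.zero_add]

theorem L_eq (t : Int) : canoniseL t = canoniseAltL t := by
  by_cases h : t < 0
  · rw [canoniseL, if_pos h, canoniseAltL, if_pos h, L_eq_nonneg (-t) (by omega)]
  · exact L_eq_nonneg t h

-- ===== VERDICT (by name: the statement is the Claim_ definition above) =====
theorem canonise_spec : Claim_equal_canonise := by
  intro t _
  unfold Spec_canonise canonise canonise_alt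
  rw [L_eq]
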